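-- pv_equiv track=rewrite | github.com/Varshitha2925/Codeforces-Solutions | Young Physicist.py | phy
-- ===== SOURCE A (Python) =====
-- def phy(vs):
--     xc = yc = zc = 0
--     for v in vs:
--         xc += v[0]
--         yc += v[1]
--         zc += v[2]
--     if(xc==yc==zc==0):
--         return "YES"
--     else:
--         return "NO"
-- ===== SOURCE B (Python) =====
-- def _total(vs):
--     # divide-and-conquer sum of the vectors in vs
--     if not vs:
--         return (0, 0, 0)
--     if len(vs) == 1:
--         v = vs[0]
--         return (v[0], v[1], v[2])
--     mid = len(vs) // 2
--     a = _total(vs[:mid])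
--     b = _total(vs[mid:])
--     return (a[0] + b[0], a[1] + b[1], a[2] + b[2])
--
--
-- def phy(vs):
--     return "YES" if _total(list(vs)) == (0, 0, 0) else "NO"
-- ===== Notes on version B (the rewrite author's own statement) =====
-- stated objective: alternative
-- what changed: Replaces the single linear loop with three accumulators by a divide-and-conquer recursion that splits the list in halves, sums each half's vector recursively and adds the two partial vectors.
import Mathlib
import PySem

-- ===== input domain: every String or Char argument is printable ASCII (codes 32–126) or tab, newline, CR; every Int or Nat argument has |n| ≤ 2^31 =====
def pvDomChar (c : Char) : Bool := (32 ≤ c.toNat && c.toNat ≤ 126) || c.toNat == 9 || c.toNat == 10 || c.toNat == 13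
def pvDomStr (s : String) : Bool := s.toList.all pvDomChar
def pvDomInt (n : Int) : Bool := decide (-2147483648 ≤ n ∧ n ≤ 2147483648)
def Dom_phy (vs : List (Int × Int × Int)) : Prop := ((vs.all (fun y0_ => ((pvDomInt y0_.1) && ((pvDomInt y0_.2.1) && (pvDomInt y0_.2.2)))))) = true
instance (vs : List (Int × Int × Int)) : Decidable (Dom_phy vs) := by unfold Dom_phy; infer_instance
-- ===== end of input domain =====

-- B sums the vectors by divide-and-conquer (split in halves, add partial vector sums) instead of A's linear loop with three accumulators; objective: alternative.


-- ===== PORT A =====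
-- A: fold over vectors carrying three coordinate accumulators, then test all three are zero.
def phy (vs : List (Int × Int × Int)) : String :=
  let s := vs.foldl (fun (acc : Int × Int × Int) v =>
    (acc.1 + v.1, acc.2.1 + v.2.1, acc.2.2 + v.2.2)) (0, 0, 0)
  if s.1 = 0 ∧ s.2.1 = 0 ∧ s.2.2 = 0 then "YES" else "NO"

-- ===== PORT B =====
-- B helper: divide-and-conquer vector sum (vs[:mid] / vs[mid:] ported as take/drop).
def phyTotal (vs : List (Int × Int × Int)) : Int × Int × Int :=
  match h : vs with
  | [] => (0, 0, 0)
  | [v] => (v.1, v.2.1, v.2.2)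
  | _ :: _ :: _ =>
    let mid := vs.length / 2
    let a := phyTotal (vs.take mid)
    let b := phyTotal (vs.drop mid)
    (a.1 + b.1, a.2.1 + b.2.1, a.2.2 + b.2.2)
termination_by vs.length
decreasing_by
  · simp [h]; omega
  · simp [h]; omega

def phy_alt (vs : List (Int × Int × Int)) : String :=
  if phyTotal vs = (0, 0, 0) then "YES" else "NO"

-- ===== PRECONDITION & SPEC =====
def Spec_phy (vs : List (Int × Int × Int)) (out : String) : Prop := out = phy_alt vs
instance (vs : List (Int × Int × Int)) (out : String) : Decidable (Spec_phy vs out) := by unfold Spec_phy; infer_instance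

-- ===== CLAIM (what is proved, stated in full; the proofs are below) =====
def Claim_equal_phy : Prop := ∀ (vs : List (Int × Int × Int)), Dom_phy vs → Spec_phy vs (phy vs)

-- ===== LEMMAS AND PROOFS =====
lemma phy_fold (vs : List (Int × Int × Int)) (a b c : Int) :
    vs.foldl (fun (acc : Int × Int × Int) v =>
      (acc.1 + v.1, acc.2.1 + v.2.1, acc.2.2 + v.2.2)) (a, b, c)
    = (a + (vs.map (·.1)).sum, b + (vs.map (·.2.1)).sum, c + (vs.map (·.2.2)).sum) := by
  induction vs generalizing a b c with
  | nil => simp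
  | cons v t ih => simp [List.foldl, ih]; refine ⟨by ring, by ring, by ring⟩

lemma phyTotal_eq (vs : List (Int × Int × Int)) :
    phyTotal vs = ((vs.map (·.1)).sum, (vs.map (·.2.1)).sum, (vs.map (·.2.2)).sum) := by
  fun_induction phyTotal vs with
  | case1 => simp
  | case2 v => simp
  | case3 a b t h iha ihb =>
    have hh : (a :: b :: t).length / 2 = h := rfl
    simp only [hh, iha, ihb, List.map_take, List.map_drop, List.sum_take_add_sum_drop]

-- ===== VERDICT (by name: the statement is the Claim_ definition above) =====
theorem phy_spec : Claim_equal_phy := by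
  intro vs _
  unfold Spec_phy phy phy_alt
  simp only [phy_fold, phyTotal_eq, zero_add, Prod.ext_iff]
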